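-- pv_equiv track=rewrite | github.com/DanielOsuoha/React_dev | DSA/CodePath/unit_one/difuse_the_bomb.py | defuse
-- ===== SOURCE A (Python) =====
-- def defuse(code, k):
--     n = len(code)
--     if k == 0:
--         return [0] * n
--     result = [0] * n
--     window_sum = 0
--     start, end = (1, k) if k > 0 else (n + k, n - 1)
--
--     # Compute the initial sum for the first window
--     for i in range(start, end + 1):
--         window_sum += code[i % n]
--
--     # Slide over the array
--     for i in range(n):
--         result[i] = window_sum
--         window_sum -= code[start % n]
--         start += 1
--         end += 1
--         window_sum += code[end % n]
--
--     return result
-- ===== SOURCE B (Python) =====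
-- def defuse(code, k):
--     n = len(code)
--     if k == 0:
--         return [0] * n
--     js = range(1, k + 1) if k > 0 else range(k, 0)
--     return [sum(code[(i + j) % n] for j in js) for i in range(n)]
-- ===== Notes on version B (the rewrite author's own statement) =====
-- stated objective: simpler
-- what changed: Replaced the sliding-window with a maintained running sum by a direct two-line formulation: for each index i sum its |k| modular neighbors from scratch (a comprehension over range(n) with an inner sum), so no mutable window state.
-- outside the precondition, e.g. on defuse([], 1): A raises ZeroDivisionError, B returns []
import Mathlib
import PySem

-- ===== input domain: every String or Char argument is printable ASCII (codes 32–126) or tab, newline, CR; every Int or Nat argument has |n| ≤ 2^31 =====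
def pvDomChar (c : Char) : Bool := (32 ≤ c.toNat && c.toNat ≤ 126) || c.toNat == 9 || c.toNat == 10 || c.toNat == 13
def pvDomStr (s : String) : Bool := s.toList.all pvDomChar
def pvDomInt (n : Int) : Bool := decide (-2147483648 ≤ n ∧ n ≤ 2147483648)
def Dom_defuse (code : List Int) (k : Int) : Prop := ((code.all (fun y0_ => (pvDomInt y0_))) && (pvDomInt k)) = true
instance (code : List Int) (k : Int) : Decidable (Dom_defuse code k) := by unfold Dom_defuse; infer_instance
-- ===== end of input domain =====

-- B replaces A's running-sum sliding window by a direct per-index sum of the |k| modular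
-- neighbors (simpler: two lines, no mutable window state); return values agree wherever A returns.

-- ===== PORT A =====
-- code[i % n]: exact via pyGet? of the Python mod; within Pre_ (code ≠ [] when k ≠ 0) the
-- index i % n is always in range, so the .getD 0 default is never used.
def defuse (code : List Int) (k : Int) : List Int :=
  let n : Int := PySem.List.len code
  if k = 0 then List.replicate code.length 0
  else
    let se := if k > 0 then ((1 : Int), k) else (n + k, n - 1)
    -- initial window sum: for i in range(start, end+1): window_sum += code[i % n]
    let ws0 := (PySem.List.pyRange se.1 (se.2 + 1) 1).foldl
      (fun acc i => acc + (PySem.List.pyGet? code (PySem.Int.mod i n)).getD 0) 0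
    -- slide: for i in range(n): result[i] = ws; ws -= code[start%n]; start+=1; end+=1; ws += code[end%n]
    -- (result[i] is assigned for i = 0,1,…,n-1 in order, hence built here by appending)
    let st := (PySem.List.pyRange 0 n 1).foldl
      (fun (p : List Int × Int × Int × Int) _ =>
        let ws1 := p.2.1 - (PySem.List.pyGet? code (PySem.Int.mod p.2.2.1 n)).getD 0
        let s1 := p.2.2.1 + 1
        let e1 := p.2.2.2 + 1
        (p.1 ++ [p.2.1], ws1 + (PySem.List.pyGet? code (PySem.Int.mod e1 n)).getD 0, s1, e1))
      (([] : List Int), ws0, se.1, se.2)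
    st.1

-- ===== PORT B =====
def defuse_alt (code : List Int) (k : Int) : List Int :=
  let n : Int := PySem.List.len code
  if k = 0 then List.replicate code.length 0
  else
    let js := if k > 0 then PySem.List.pyRange 1 (k + 1) 1 else PySem.List.pyRange k 0 1
    (PySem.List.pyRange 0 n 1).map (fun i =>
      js.foldl (fun s j => s + (PySem.List.pyGet? code (PySem.Int.mod (i + j) n)).getD 0) 0)

-- ===== PRECONDITION & SPEC =====
-- Pre_ excludes exactly the inputs where A raises: empty code with k ≠ 0 (code[i % 0] → ZeroDivisionError).
def Pre_defuse (code : List Int) (k : Int) : Prop := code ≠ [] ∨ k = 0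
instance (code : List Int) (k : Int) : Decidable (Pre_defuse code k) := by unfold Pre_defuse; infer_instance
def pvWitness_defuse : List Int × Int := ([1, 2, 3], 2)

def Spec_defuse (code : List Int) (k : Int) (out : List Int) : Prop := out = defuse_alt code k
instance (code : List Int) (k : Int) (out : List Int) : Decidable (Spec_defuse code k out) := by unfold Spec_defuse; infer_instance

-- ===== CLAIM (what is proved, stated in full; the proofs are below) =====
def Claim_equal_defuse : Prop := ∀ (code : List Int) (k : Int), Dom_defuse code k → Pre_defuse code k → Spec_defuse code k (defuse code k)
-- ===== LEMMAS AND PROOFS =====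

-- g code t = code[t % n] (with the never-used default); f code a b = sum of g over [a, b)
def pvG (code : List Int) (t : Int) : Int :=
  (PySem.List.pyGet? code (PySem.Int.mod t (PySem.List.len code))).getD 0

def pvF (code : List Int) (a b : Int) : Int :=
  ((PySem.List.pyRange a b 1).map (pvG code)).sum

lemma pvG_period (code : List Int) (t : Int) (h : code ≠ []) :
    pvG code (t + (PySem.List.len code)) = pvG code t := by
  have hn : (0 : Int) < PySem.List.len code := by
    simp [PySem.List.len_eq]
    exact List.length_pos_iff.mpr h
  unfold pvG
  rw [PySem.Int.mod_eq_emod_of_pos hn, PySem.Int.mod_eq_emod_of_pos hn, Int.add_emod_right]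

lemma pvF_shift (code : List Int) (a b : Int) (hab : a < b) :
    pvF code (a + 1) (b + 1) = pvF code a b - pvG code a + pvG code b := by
  unfold pvF
  rw [PySem.List.pyRange_one_succ_right (by omega : a + 1 ≤ b),
      PySem.List.pyRange_one_cons (by omega : a < b)]
  simp

lemma pvF_window (code : List Int) (c a b : Int) :
    ((PySem.List.pyRange a b 1).map (fun j => pvG code (c + j))).sum = pvF code (c + a) (c + b) := by
  unfold pvF
  rw [PySem.List.pyRange_one a b, PySem.List.pyRange_one (c + a) (c + b), List.map_map, List.map_map]
  have h : (c + b) - (c + a) = b - a := by ring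
  rw [h]
  refine congrArg List.sum (List.map_congr_left (fun t _ => ?_))
  simp only [Function.comp_apply]
  ring_nf

lemma pvF_period (code : List Int) (a b : Int) (h : code ≠ []) :
    pvF code (a + PySem.List.len code) (b + PySem.List.len code) = pvF code a b := by
  unfold pvF
  rw [PySem.List.pyRange_one a b, PySem.List.pyRange_one (a + PySem.List.len code) (b + PySem.List.len code),
      List.map_map, List.map_map]
  have hd : (b + PySem.List.len code) - (a + PySem.List.len code) = b - a := by ring
  rw [hd]
  refine congrArg List.sum (List.map_congr_left (fun t _ => ?_))
  simp only [Function.comp_apply]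
  have hp := pvG_period code (a + t) h
  rw [show a + PySem.List.len code + (t : Int) = a + t + PySem.List.len code by ring, hp]

-- A's sliding loop, characterised: starting from window [s, e] with s ≤ e, after folding over
-- any list l the result component is the list of successive window sums.
lemma pvLoopA (code : List Int) (l : List Int) (res : List Int) (s e : Int) (hse : s ≤ e) :
    (l.foldl
      (fun (p : List Int × Int × Int × Int) _ =>
        let ws1 := p.2.1 - (PySem.List.pyGet? code (PySem.Int.mod p.2.2.1 (PySem.List.len code))).getD 0
        let s1 := p.2.2.1 + 1
        let e1 := p.2.2.2 + 1
        (p.1 ++ [p.2.1], ws1 + (PySem.List.pyGet? code (PySem.Int.mod e1 (PySem.List.len code))).getD 0, s1, e1))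
      (res, pvF code s (e + 1), s, e)).1
    = res ++ (List.range l.length).map (fun i : Nat => pvF code (s + (i : Int)) (e + 1 + (i : Int))) := by
  induction l generalizing res s e with
  | nil => simp
  | cons x xs ih =>
    simp only [List.foldl_cons]
    have hstep : pvF code s (e + 1) - pvG code s + pvG code (e + 1) = pvF code (s + 1) (e + 1 + 1) := by
      rw [pvF_shift code s (e + 1) (by omega)]
    have hih := ih (res ++ [pvF code s (e + 1)]) (s + 1) (e + 1) (by omega)
    simp only [pvG] at hstep
    simp only [hstep]
    rw [hih, List.append_assoc]
    congr 1
    rw [List.length_cons, List.range_succ_eq_map, List.map_cons, List.map_map]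
    simp only [List.singleton_append, Nat.cast_zero, add_zero]
    congr 1
    refine List.map_congr_left (fun i _ => ?_)
    simp only [Function.comp_apply]
    push_cast
    ring_nf

-- B's entries, as window sums
lemma pvAltB_pos (code : List Int) (k : Int) (hkp : 0 < k) :
    defuse_alt code k
      = (PySem.List.pyRange 0 (PySem.List.len code) 1).map
          (fun i => pvF code (i + 1) (i + (k + 1))) := by
  unfold defuse_alt
  simp only [if_neg (show ¬ k = 0 by omega), if_pos hkp]
  refine List.map_congr_left (fun i _ => ?_)
  rw [PySem.List.foldl_add, zero_add]
  simpa [pvG] using pvF_window code i 1 (k + 1)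

lemma pvAltB_neg (code : List Int) (k : Int) (hkn : k < 0) :
    defuse_alt code k
      = (PySem.List.pyRange 0 (PySem.List.len code) 1).map
          (fun i => pvF code (i + k) (i + 0)) := by
  unfold defuse_alt
  simp only [if_neg (show ¬ k = 0 by omega), if_neg (show ¬ k > 0 by omega)]
  refine List.map_congr_left (fun i _ => ?_)
  rw [PySem.List.foldl_add, zero_add]
  simpa [pvG] using pvF_window code i k 0

-- A's result, as window sums
lemma pvA_pos (code : List Int) (k : Int) (hkp : 0 < k) :
    defuse code k
      = (List.range code.length).map
          (fun i : Nat => pvF code (1 + (i : Int)) (k + 1 + (i : Int))) := by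
  unfold defuse
  simp only [if_neg (show ¬ k = 0 by omega), if_pos hkp]
  have hws : (PySem.List.pyRange 1 (k + 1) 1).foldl
      (fun acc i => acc + (PySem.List.pyGet? code (PySem.Int.mod i (PySem.List.len code))).getD 0) 0
      = pvF code 1 (k + 1) := by
    rw [PySem.List.foldl_add, zero_add]; rfl
  rw [hws, pvLoopA code _ [] 1 k (by omega)]
  simp [PySem.List.length_pyRange_one, PySem.List.len_eq]

lemma pvA_neg (code : List Int) (k : Int) (hkn : k < 0) (hne : code ≠ []) :
    defuse code k
      = (List.range code.length).map
          (fun i : Nat => pvF code (PySem.List.len code + k + (i : Int))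
                                    (PySem.List.len code - 1 + 1 + (i : Int))) := by
  unfold defuse
  simp only [if_neg (show ¬ k = 0 by omega), if_neg (show ¬ k > 0 by omega)]
  have hws : (PySem.List.pyRange (PySem.List.len code + k) (PySem.List.len code - 1 + 1) 1).foldl
      (fun acc i => acc + (PySem.List.pyGet? code (PySem.Int.mod i (PySem.List.len code))).getD 0) 0
      = pvF code (PySem.List.len code + k) (PySem.List.len code - 1 + 1) := by
    rw [PySem.List.foldl_add, zero_add]; rfl
  rw [hws, pvLoopA code _ [] (PySem.List.len code + k) (PySem.List.len code - 1) (by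
    have : (0 : Int) < PySem.List.len code := by
      simp [PySem.List.len_eq]; exact List.length_pos_iff.mpr hne
    omega)]
  simp [PySem.List.length_pyRange_one, PySem.List.len_eq]

theorem defuse_spec : Claim_equal_defuse := by
  intro code k _ hpre
  unfold Spec_defuse
  by_cases hk : k = 0
  · simp [defuse, defuse_alt, hk]
  · have hne : code ≠ [] := by
      rcases hpre with h | h
      · exact h
      · exact absurd h hk
    by_cases hkp : 0 < k
    · rw [pvA_pos code k hkp, pvAltB_pos code k hkp, PySem.List.pyRange_zero,
          PySem.List.len_eq, List.map_map]
      refine List.map_congr_left (fun i _ => ?_)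
      simp only [Function.comp_apply]
      congr 1 <;> ring
    · have hkn : k < 0 := by omega
      rw [pvA_neg code k hkn hne, pvAltB_neg code k hkn, PySem.List.pyRange_zero,
          PySem.List.len_eq, List.map_map]
      refine List.map_congr_left (fun i _ => ?_)
      simp only [Function.comp_apply]
      have hp := pvF_period code ((i : Int) + k) ((i : Int) + 0) hne
      simp only [PySem.List.len_eq] at hp
      rw [show (code.length : Int) + k + (i : Int) = (i : Int) + k + (code.length : Int) from by ring,
          show (code.length : Int) - 1 + 1 + (i : Int) = (i : Int) + 0 + (code.length : Int) from by ring,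
          hp]
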